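-- pv_equiv track=rewrite | github.com/ppalantir/axjingWorks | algorithm_note/tencent3exp2.py | Solve
-- ===== SOURCE A (Python) =====
-- def Solve(li):
--     box = []
--     n = 0
--     li_m = []
--     li_h = []
--     for i in range(len(li)):
--         for j in range(len(li)):
--             if li[i] > li[j]:
--                 m = [li[j], li[i]]
--             else:
--                 m = [li[i], li[j]]
--             if m not in box and i != j:
--                 box.append(m)
--                 if abs(m[0]) > abs(m[1]):
--                     m_ = [abs(m[1]), abs(m[0])]
--                 else:
--                     m_ = [abs(m[0]), abs(m[1])]
--                 if abs(m[0] + m[1]) > abs(m[0] - m[1]):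
--                     h_ = [abs(m[0] - m[1]), abs(m[0] + m[1])]
--                 else:
--                     h_ = [abs(m[0] + m[1]), abs(m[0] - m[1])]
--                 if m_[0]>=h_[0] and m_[1]<=h_[1]:
--                     n += 1
--
--     return n
-- ===== SOURCE B (Python) =====
-- def Solve(li):
--     # Deduplicate once, then examine each unordered pair of distinct values once.
--     seen = set()
--     dup = set()
--     uniq = []
--     for v in li:
--         if v in seen:
--             dup.add(v)
--         else:
--             seen.add(v)
--             uniq.append(v)
--     # every value occurring at least twice contributes the pair [v, v],
--     # which always satisfies the magnitude condition
--     n = len(dup)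
--     rest = uniq
--     while rest:
--         a = rest[0]
--         rest = rest[1:]
--         for b in rest:
--             if min(abs(a), abs(b)) >= min(abs(a + b), abs(a - b)) and \
--                max(abs(a), abs(b)) <= max(abs(a + b), abs(a - b)):
--                 n += 1
--     return n
-- ===== Notes on version B (the rewrite author's own statement) =====
-- stated objective: faster
-- what changed: Replace the O(n^2) index-pair loop with list-membership dedup of candidate pairs by a single dedup pass over the values followed by one scan over unordered pairs of distinct unique values, adding 1 per value occurring at least twice (its self-pair always satisfies the predicate).
import Mathlib
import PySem

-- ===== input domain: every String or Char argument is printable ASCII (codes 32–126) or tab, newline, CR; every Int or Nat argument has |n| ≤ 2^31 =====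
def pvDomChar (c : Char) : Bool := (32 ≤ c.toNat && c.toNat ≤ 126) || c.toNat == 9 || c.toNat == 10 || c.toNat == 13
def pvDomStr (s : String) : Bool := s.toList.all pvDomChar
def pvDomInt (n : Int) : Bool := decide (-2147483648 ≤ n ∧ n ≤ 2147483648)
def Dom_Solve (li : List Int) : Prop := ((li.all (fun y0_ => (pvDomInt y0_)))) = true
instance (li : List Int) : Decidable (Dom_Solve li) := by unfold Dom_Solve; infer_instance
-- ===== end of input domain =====

-- B replaces A's quadratic index-pair loop with a box-membership dedup by a single
-- value-dedup pass plus one scan over unordered pairs of distinct unique values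
-- (each value with multiplicity ≥ 2 contributes its self-pair, which always passes).

-- ===== PORT A =====
def Solve (li : List Int) : Int :=
  ((PySem.List.pyRange 0 (PySem.List.len li) 1).foldl (fun s i =>
    (PySem.List.pyRange 0 (PySem.List.len li) 1).foldl (fun s j =>
      let a := PySem.List.pyGetD li i 0
      let b := PySem.List.pyGetD li j 0
      let m : Int × Int := if a > b then (b, a) else (a, b)
      if m ∉ s.1 ∧ i ≠ j then
        let m_ : Int × Int := if |m.1| > |m.2| then (|m.2|, |m.1|) else (|m.1|, |m.2|)
        let h_ : Int × Int := if |m.1 + m.2| > |m.1 - m.2| then (|m.1 - m.2|, |m.1 + m.2|)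
                              else (|m.1 + m.2|, |m.1 - m.2|)
        (s.1 ++ [m], if m_.1 ≥ h_.1 ∧ m_.2 ≤ h_.2 then s.2 + 1 else s.2)
      else s) s) (([] : List (Int × Int)), (0 : Int))).2

-- ===== PORT B =====
-- the 'while rest: a = rest[0]; rest = rest[1:]; for b in rest: …' loop of Source B
def solveAltCross : List Int → Int → Int
  | [], n => n
  | a :: rest, n =>
      solveAltCross rest (rest.foldl (fun n b =>
        if min |a| |b| ≥ min |a + b| |a - b| ∧ max |a| |b| ≤ max |a + b| |a - b|
        then n + 1 else n) n)

def Solve_alt (li : List Int) : Int :=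
  let s := li.foldl (fun s v =>
    if PySem.Set.contains s.1 v then (s.1, PySem.Set.add s.2.1 v, s.2.2)
    else (PySem.Set.add s.1 v, s.2.1, s.2.2 ++ [v]))
    ((PySem.Set.empty : PySem.Set Int), (PySem.Set.empty : PySem.Set Int), ([] : List Int))
  solveAltCross s.2.2 (PySem.Set.len s.2.1)

-- ===== PRECONDITION & SPEC =====
def Spec_Solve (li : List Int) (out : Int) : Prop := out = Solve_alt li
instance (li : List Int) (out : Int) : Decidable (Spec_Solve li out) := by unfold Spec_Solve; infer_instance

-- ===== CLAIM (what is proved, stated in full; the proofs are below) =====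
def Claim_equal_Solve : Prop := ∀ (li : List Int), Dom_Solve li → Spec_Solve li (Solve li)

-- ===== LEMMAS AND PROOFS =====

-- the sorted value pair A stores in its box, and the magnitude predicate
def sortp (a b : Int) : Int × Int := (min a b, max a b)
def good (a b : Int) : Bool :=
  decide (min |a| |b| ≥ min |a + b| |a - b| ∧ max |a| |b| ≤ max |a + b| |a - b|)
def pgood (p : Int × Int) : Bool := good p.1 p.2

theorem good_comm (a b : Int) : good a b = good b a := by
  unfold good
  rw [min_comm |a| |b|, max_comm |a| |b|, add_comm a b, abs_sub_comm a b]

theorem good_self (a : Int) : good a a = true := by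
  have h : |a + a| = 2 * |a| := by rw [← two_mul, abs_mul]; norm_num
  have h0 : (0:Int) ≤ |a| := abs_nonneg a
  simp only [good, sub_self, abs_zero, decide_eq_true_eq]
  omega

theorem pgood_sortp (a b : Int) : pgood (sortp a b) = good a b := by
  unfold pgood sortp
  rcases le_total a b with h | h
  · rw [min_eq_left h, max_eq_right h]
  · rw [min_eq_right h, max_eq_left h, good_comm]

-- A's loop abstracted: the triple (li[i], li[j], i ≠ j) stream and the box/count step
def stepT (s : List (Int × Int) × Int) (t : Int × Int × Bool) : List (Int × Int) × Int :=
  if sortp t.1 t.2.1 ∉ s.1 ∧ t.2.2 = true then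
    (s.1 ++ [sortp t.1 t.2.1], if good t.1 t.2.1 then s.2 + 1 else s.2)
  else s

def tri (li : List Int) : List (Int × Int × Bool) :=
  (List.range li.length).flatMap (fun i =>
    (List.range li.length).map (fun j => (li.getD i 0, li.getD j 0, decide (i ≠ j))))

theorem ifsort (a b : Int) : (if a > b then ((b, a) : Int × Int) else (a, b)) = sortp a b := by
  unfold sortp; split_ifs with h
  · rw [min_eq_right h.le, max_eq_left h.le]
  · rw [not_lt] at h; rw [min_eq_left h, max_eq_right h]

theorem bodyA_eq (s : List (Int × Int) × Int) (li : List Int) (i j : Nat) :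
    (let a := PySem.List.pyGetD li (i : Int) 0
     let b := PySem.List.pyGetD li (j : Int) 0
     let m : Int × Int := if a > b then (b, a) else (a, b)
     if m ∉ s.1 ∧ (i : Int) ≠ (j : Int) then
       let m_ : Int × Int := if |m.1| > |m.2| then (|m.2|, |m.1|) else (|m.1|, |m.2|)
       let h_ : Int × Int := if |m.1 + m.2| > |m.1 - m.2| then (|m.1 - m.2|, |m.1 + m.2|)
                             else (|m.1 + m.2|, |m.1 - m.2|)
       (s.1 ++ [m], if m_.1 ≥ h_.1 ∧ m_.2 ≤ h_.2 then s.2 + 1 else s.2)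
     else s) =
    stepT s (li.getD i 0, li.getD j 0, decide (i ≠ j)) := by
  simp only [PySem.List.pyGetD_natCast]
  set a := li.getD i 0
  set b := li.getD j 0
  rw [ifsort a b]
  set m := sortp a b with hm
  rw [ifsort |m.1| |m.2|, ifsort |m.1 + m.2| |m.1 - m.2|]
  have hcond : ((sortp |m.1| |m.2|).1 ≥ (sortp |m.1 + m.2| |m.1 - m.2|).1 ∧
      (sortp |m.1| |m.2|).2 ≤ (sortp |m.1 + m.2| |m.1 - m.2|).2) ↔ (good a b = true) := by
    rw [← pgood_sortp a b, ← hm]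
    simp only [pgood, good, sortp, decide_eq_true_eq, ge_iff_le]
  have hij : ((i : Int) ≠ (j : Int)) ↔ (decide (i ≠ j) = true) := by simp
  simp only [stepT, hcond, hij]
  rw [hm]


theorem bridgeA (li : List Int) : Solve li = ((tri li).foldl stepT ([], 0)).2 := by
  unfold Solve tri
  rw [List.foldl_flatMap]
  have hr : PySem.List.pyRange 0 (PySem.List.len li) 1 =
      (List.range li.length).map (fun k : Nat => (k : Int)) := by
    rw [PySem.List.len_eq, PySem.List.pyRange_zero_natCast]
  rw [hr]
  simp only [List.foldl_map]
  refine congrArg Prod.snd ?_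
  refine PySem.List.foldl_congr_mem _ _ _ _ (fun s k _ => ?_)
  refine PySem.List.foldl_congr_mem _ _ _ _ (fun s' j _ => ?_)
  exact bodyA_eq s' li k j

theorem loopInv (ts : List (Int × Int × Bool)) (box : List (Int × Int)) (n : Int)
    (hnd : box.Nodup) (hn : n = (box.countP pgood : Int)) :
    (ts.foldl stepT (box, n)).1.Nodup ∧
    (ts.foldl stepT (box, n)).2 = ((ts.foldl stepT (box, n)).1.countP pgood : Int) ∧
    (∀ p, p ∈ (ts.foldl stepT (box, n)).1 ↔
      (p ∈ box ∨ ∃ t ∈ ts, t.2.2 = true ∧ p = sortp t.1 t.2.1)) := by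
  induction ts generalizing box n with
  | nil => refine ⟨hnd, by simpa using hn, fun p => by simp⟩
  | cons t ts ih =>
    simp only [List.foldl_cons]
    by_cases hc : sortp t.1 t.2.1 ∉ box ∧ t.2.2 = true
    · have hstep : stepT (box, n) t =
          (box ++ [sortp t.1 t.2.1], if good t.1 t.2.1 then n + 1 else n) := by
        simp only [stepT, if_pos hc]
      rw [hstep]
      have hnd' : (box ++ [sortp t.1 t.2.1]).Nodup := by
        simp only [List.nodup_append, List.nodup_singleton]
        exact ⟨hnd, trivial, fun a ha b hb => by
          rw [List.mem_singleton] at hb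
          subst hb; exact fun h => hc.1 (h ▸ ha)⟩
      have hn' : (if good t.1 t.2.1 then n + 1 else n) =
          (((box ++ [sortp t.1 t.2.1]).countP pgood : Nat) : Int) := by
        rw [List.countP_append, List.countP_singleton, pgood_sortp]
        by_cases hg : good t.1 t.2.1 <;> simp [hg, hn]
      obtain ⟨h1, h2, h3⟩ := ih _ _ hnd' hn'
      refine ⟨h1, h2, fun p => ?_⟩
      rw [h3 p]
      simp only [List.mem_append, List.mem_singleton]
      constructor
      · rintro (⟨h | h⟩ | ⟨u, hu, hk, hp⟩)
        · exact Or.inl h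
        · exact Or.inr ⟨t, List.mem_cons_self .., hc.2, h⟩
        · exact Or.inr ⟨u, List.mem_cons_of_mem _ hu, hk, hp⟩
      · rintro (h | ⟨u, hu, hk, hp⟩)
        · exact Or.inl (Or.inl h)
        · rcases List.mem_cons.1 hu with rfl | hu
          · exact Or.inl (Or.inr hp)
          · exact Or.inr ⟨u, hu, hk, hp⟩
    · have hstep : stepT (box, n) t = (box, n) := by
        simp only [stepT, if_neg hc]
      rw [hstep]
      obtain ⟨h1, h2, h3⟩ := ih _ _ hnd hn
      refine ⟨h1, h2, fun p => ?_⟩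
      rw [h3 p]
      constructor
      · rintro (h | ⟨u, hu, hk, hp⟩)
        · exact Or.inl h
        · exact Or.inr ⟨u, List.mem_cons_of_mem _ hu, hk, hp⟩
      · rintro (h | ⟨u, hu, hk, hp⟩)
        · exact Or.inl h
        · rcases List.mem_cons.1 hu with rfl | hu
          · -- the skipped triple: either its flag is false or its pair is already in box
            rcases Decidable.not_and_iff_or_not.1 hc with hmem | hflag
            · exact Or.inl (hp ▸ Decidable.not_not.1 hmem)
            · exact absurd hk hflag
          · exact Or.inr ⟨u, hu, hk, hp⟩

-- the distinct pairs A ever stores, described by values only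
def Mset (li : List Int) (p : Int × Int) : Prop :=
  (∃ a b, a ∈ li ∧ b ∈ li ∧ a ≠ b ∧ p = sortp a b) ∨ (∃ v, 2 ≤ li.count v ∧ p = (v, v))

theorem sortp_comm (a b : Int) : sortp a b = sortp b a := by
  unfold sortp; rw [min_comm, max_comm]

theorem sortp_self (a : Int) : sortp a a = (a, a) := by
  simp [sortp]

theorem sortp_inj {a b c d : Int} (h : sortp a b = sortp c d) :
    (a = c ∧ b = d) ∨ (a = d ∧ b = c) := by
  simp only [sortp, Prod.mk.injEq] at h
  omega

theorem mem_tri (li : List Int) (t : Int × Int × Bool) :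
    t ∈ tri li ↔ ∃ i j, i < li.length ∧ j < li.length ∧
      t = (li.getD i 0, li.getD j 0, decide (i ≠ j)) := by
  simp only [tri, List.mem_flatMap, List.mem_map, List.mem_range]
  constructor
  · rintro ⟨i, hi, j, hj, rfl⟩; exact ⟨i, j, hi, hj, rfl⟩
  · rintro ⟨i, j, hi, hj, rfl⟩; exact ⟨i, hi, j, hj, rfl⟩

theorem getD_mem_of_lt (li : List Int) {i : Nat} (hi : i < li.length) : li.getD i 0 ∈ li := by
  rw [List.getD_eq_getElem li 0 hi]; exact List.getElem_mem hi

theorem two_le_count_iff (li : List Int) (v : Int) :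
    2 ≤ li.count v ↔ ∃ i j, i < li.length ∧ j < li.length ∧ i ≠ j ∧
      li.getD i 0 = v ∧ li.getD j 0 = v := by
  rw [← List.duplicate_iff_two_le_count, List.duplicate_iff_exists_distinct_get]
  constructor
  · rintro ⟨n, m, hnm, hv1, hv2⟩
    exact ⟨n, m, n.isLt, m.isLt, Nat.ne_of_lt hnm,
      by rw [List.getD_eq_getElem li 0 n.isLt]; exact hv1.symm,
      by rw [List.getD_eq_getElem li 0 m.isLt]; exact hv2.symm⟩
  · rintro ⟨i, j, hi, hj, hij, hvi, hvj⟩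
    rcases Nat.lt_or_gt_of_ne hij with h | h
    · exact ⟨⟨i, hi⟩, ⟨j, hj⟩, h,
        by rw [← hvi, List.getD_eq_getElem li 0 hi]; rfl,
        by rw [← hvj, List.getD_eq_getElem li 0 hj]; rfl⟩
    · exact ⟨⟨j, hj⟩, ⟨i, hi⟩, h,
        by rw [← hvj, List.getD_eq_getElem li 0 hj]; rfl,
        by rw [← hvi, List.getD_eq_getElem li 0 hi]; rfl⟩

theorem memBoxChar (li : List Int) (p : Int × Int) :
    (∃ t ∈ tri li, t.2.2 = true ∧ p = sortp t.1 t.2.1) ↔ Mset li p := by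
  constructor
  · rintro ⟨t, ht, hk, hp⟩
    obtain ⟨i, j, hi, hj, rfl⟩ := (mem_tri li t).1 ht
    simp only [decide_eq_true_eq] at hk
    by_cases hab : li.getD i 0 = li.getD j 0
    · refine Or.inr ⟨li.getD i 0, ?_, by rw [hp, hab, sortp_self, ← hab]⟩
      exact (two_le_count_iff li _).2 ⟨i, j, hi, hj, hk, rfl, hab.symm⟩
    · exact Or.inl ⟨li.getD i 0, li.getD j 0, getD_mem_of_lt li hi, getD_mem_of_lt li hj,
        hab, hp⟩
  · rintro (⟨a, b, ha, hb, hne, hp⟩ | ⟨v, hc, hp⟩)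
    · obtain ⟨i, hi, hia⟩ := List.mem_iff_getElem.1 ha
      obtain ⟨j, hj, hjb⟩ := List.mem_iff_getElem.1 hb
      have hia' : li.getD i 0 = a := by rw [List.getD_eq_getElem li 0 hi]; exact hia
      have hjb' : li.getD j 0 = b := by rw [List.getD_eq_getElem li 0 hj]; exact hjb
      refine ⟨(li.getD i 0, li.getD j 0, decide (i ≠ j)), (mem_tri li _).2 ⟨i, j, hi, hj, rfl⟩,
        ?_, by rw [hia', hjb']; exact hp⟩
      simp only [decide_eq_true_eq]
      rintro rfl
      exact hne (hia'.symm.trans hjb')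
    · obtain ⟨i, j, hi, hj, hij, hvi, hvj⟩ := (two_le_count_iff li v).1 hc
      exact ⟨(li.getD i 0, li.getD j 0, decide (i ≠ j)), (mem_tri li _).2 ⟨i, j, hi, hj, rfl⟩,
        by simp [hij], by rw [hvi, hvj, sortp_self, hp]⟩

-- B side: unordered pairs of a nodup list
def cross : List Int → List (Int × Int)
  | [] => []
  | a :: rest => rest.map (sortp a) ++ cross rest

theorem cross_mem (l : List Int) (hnd : l.Nodup) (p : Int × Int) :
    p ∈ cross l ↔ ∃ a b, a ∈ l ∧ b ∈ l ∧ a ≠ b ∧ p = sortp a b := by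
  induction l with
  | nil => simp [cross]
  | cons a rest ih =>
    obtain ⟨hna, hnd'⟩ := List.nodup_cons.1 hnd
    simp only [cross, List.mem_append, List.mem_map, ih hnd']
    constructor
    · rintro (⟨b, hb, rfl⟩ | ⟨x, y, hx, hy, hne, rfl⟩)
      · exact ⟨a, b, List.mem_cons_self .., List.mem_cons_of_mem _ hb,
          fun h => hna (h ▸ hb), rfl⟩
      · exact ⟨x, y, List.mem_cons_of_mem _ hx, List.mem_cons_of_mem _ hy, hne, rfl⟩
    · rintro ⟨x, y, hx, hy, hne, rfl⟩
      rcases List.mem_cons.1 hx with hxa | hx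
      · rcases List.mem_cons.1 hy with hya | hy
        · exact absurd (hxa.trans hya.symm) hne
        · exact Or.inl ⟨y, hy, by rw [hxa]⟩
      · rcases List.mem_cons.1 hy with hya | hy
        · exact Or.inl ⟨x, hx, by rw [hya, sortp_comm]⟩
        · exact Or.inr ⟨x, y, hx, hy, hne, rfl⟩

theorem cross_nodup (l : List Int) (hnd : l.Nodup) : (cross l).Nodup := by
  induction l with
  | nil => simp [cross]
  | cons a rest ih =>
    obtain ⟨hna, hnd'⟩ := List.nodup_cons.1 hnd
    rw [cross, List.nodup_append]
    refine ⟨List.Nodup.map_on (fun x hx y hy h => ?_) hnd', ih hnd', fun p hp q hq => ?_⟩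
    · rcases sortp_inj h with ⟨_, h2⟩ | ⟨h1, h2⟩
      · exact h2
      · exact h2.trans h1
    · obtain ⟨b, hb, rfl⟩ := List.mem_map.1 hp
      obtain ⟨x, y, hx, hy, hne, hq'⟩ := (cross_mem rest hnd' q).1 hq
      intro h
      rw [← h] at hq'
      rcases sortp_inj hq' with ⟨h1, _⟩ | ⟨h1, _⟩
      · exact hna (h1.symm ▸ hx)
      · exact hna (h1.symm ▸ hy)

theorem cross_count (l : List Int) (n : Int) :
    solveAltCross l n = n + ((cross l).countP pgood : Int) := by
  induction l generalizing n with
  | nil => simp [solveAltCross, cross]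
  | cons a rest ih =>
    rw [solveAltCross, PySem.List.foldl_ite_add_one
      (fun b => min |a| |b| ≥ min |a + b| |a - b| ∧ max |a| |b| ≤ max |a + b| |a - b|), ih]
    rw [cross, List.countP_append, List.countP_map]
    have : (pgood ∘ sortp a) = good a := by
      funext b; exact pgood_sortp a b
    rw [this]
    have : (fun b => decide (min |a| |b| ≥ min |a + b| |a - b| ∧
        max |a| |b| ≤ max |a + b| |a - b|)) = good a := rfl
    rw [this]
    push_cast
    ring

theorem bFoldInv (l : List Int) : ∀ (pre : List Int) (dup : PySem.Set Int),
    dup.Nodup → (∀ v, v ∈ dup ↔ 2 ≤ pre.count v) →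
    ∃ dup' : PySem.Set Int, dup'.Nodup ∧ (∀ v, v ∈ dup' ↔ 2 ≤ (pre ++ l).count v) ∧
      l.foldl (fun s v =>
        if PySem.Set.contains s.1 v then (s.1, PySem.Set.add s.2.1 v, s.2.2)
        else (PySem.Set.add s.1 v, s.2.1, s.2.2 ++ [v]))
        (PySem.Set.ofList pre, dup, PySem.Set.ofList pre) =
      (PySem.Set.ofList (pre ++ l), dup', PySem.Set.ofList (pre ++ l)) := by
  induction l with
  | nil =>
    intro pre dup h1 h2
    exact ⟨dup, h1, by simpa using h2, by simp⟩
  | cons v l ih =>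
    intro pre dup h1 h2
    rw [List.foldl_cons]
    by_cases hv : v ∈ pre
    · have hc : PySem.Set.contains (PySem.Set.ofList pre) v = true := by
        rw [PySem.Set.contains_iff]; exact (PySem.Set.mem_ofList pre v).2 hv
      have hadd : PySem.Set.add (PySem.Set.ofList pre) v = PySem.Set.ofList pre := by
        simp [PySem.Set.add, hv]
      have hstate : (if PySem.Set.contains (PySem.Set.ofList pre, dup,
            PySem.Set.ofList pre).1 v then
            ((PySem.Set.ofList pre, dup, PySem.Set.ofList pre).1,
             PySem.Set.add (PySem.Set.ofList pre, dup, PySem.Set.ofList pre).2.1 v,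
             (PySem.Set.ofList pre, dup, PySem.Set.ofList pre).2.2)
          else (PySem.Set.add (PySem.Set.ofList pre, dup, PySem.Set.ofList pre).1 v,
             (PySem.Set.ofList pre, dup, PySem.Set.ofList pre).2.1,
             (PySem.Set.ofList pre, dup, PySem.Set.ofList pre).2.2 ++ [v])) =
          (PySem.Set.ofList (pre ++ [v]), PySem.Set.add dup v,
           PySem.Set.ofList (pre ++ [v])) := by
        rw [if_pos hc, PySem.Set.ofList_append_singleton, hadd]
      rw [hstate]
      have hone : 1 ≤ pre.count v := List.count_pos_iff.2 hv
      obtain ⟨dup', hd1, hd2, hd3⟩ := ih (pre ++ [v]) (PySem.Set.add dup v)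
        (PySem.Set.nodup_add dup v h1)
        (fun u => by
          rw [PySem.Set.mem_add, h2, List.count_append]
          rcases eq_or_ne u v with rfl | huv
          · simp; omega
          · simp [Ne.symm huv]; omega)
      refine ⟨dup', hd1, fun u => by rw [hd2]; simp, by rw [hd3]; simp⟩
    · have hc : PySem.Set.contains (PySem.Set.ofList pre) v = false := by
        rw [Bool.eq_false_iff, ne_eq, PySem.Set.contains_iff, PySem.Set.mem_ofList]
        exact hv
      have hadd : PySem.Set.add (PySem.Set.ofList pre) v = PySem.Set.ofList pre ++ [v] := by
        simp [PySem.Set.add, hv]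
      have hstate : (if PySem.Set.contains (PySem.Set.ofList pre, dup,
            PySem.Set.ofList pre).1 v then
            ((PySem.Set.ofList pre, dup, PySem.Set.ofList pre).1,
             PySem.Set.add (PySem.Set.ofList pre, dup, PySem.Set.ofList pre).2.1 v,
             (PySem.Set.ofList pre, dup, PySem.Set.ofList pre).2.2)
          else (PySem.Set.add (PySem.Set.ofList pre, dup, PySem.Set.ofList pre).1 v,
             (PySem.Set.ofList pre, dup, PySem.Set.ofList pre).2.1,
             (PySem.Set.ofList pre, dup, PySem.Set.ofList pre).2.2 ++ [v])) =
          (PySem.Set.ofList (pre ++ [v]), dup, PySem.Set.ofList (pre ++ [v])) := by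
        rw [if_neg (by simp [hv]), PySem.Set.ofList_append_singleton, hadd]
      rw [hstate]
      have hzero : pre.count v = 0 := List.count_eq_zero.2 hv
      obtain ⟨dup', hd1, hd2, hd3⟩ := ih (pre ++ [v]) dup h1
        (fun u => by
          rw [h2, List.count_append]
          rcases eq_or_ne u v with rfl | huv
          · simp [hzero]
          · simp [Ne.symm huv])
      refine ⟨dup', hd1, fun u => by rw [hd2]; simp, by rw [hd3]; simp⟩

theorem altChar (li : List Int) :
    ∃ dup : List Int, dup.Nodup ∧ (∀ v, v ∈ dup ↔ 2 ≤ li.count v) ∧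
      Solve_alt li = (dup.length : Int) + ((cross (PySem.List.dedup li)).countP pgood : Int) := by
  obtain ⟨dup', hd1, hd2, hd3⟩ := bFoldInv li [] PySem.Set.empty List.nodup_nil
    (fun v => by simp [PySem.Set.empty])
  refine ⟨dup', hd1, fun v => by rw [hd2]; simp, ?_⟩
  unfold Solve_alt
  rw [show (PySem.Set.ofList ([] : List Int), (PySem.Set.empty : PySem.Set Int),
      PySem.Set.ofList ([] : List Int)) =
      ((PySem.Set.empty : PySem.Set Int), (PySem.Set.empty : PySem.Set Int),
       ([] : List Int)) from rfl] at hd3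
  rw [show ([] : List Int) ++ li = li from by simp] at hd3
  rw [hd3]
  rw [cross_count, PySem.Set.len_eq, PySem.List.dedup_eq_ofList]

theorem Solve_spec' (li : List Int) : Solve li = Solve_alt li := by
  obtain ⟨dup, hdnd, hdm, hB⟩ := altChar li
  rw [bridgeA, hB]
  obtain ⟨h1, h2, h3⟩ := loopInv (tri li) [] 0 List.nodup_nil (by simp)
  rw [h2]
  set C := dup.map (fun v => (v, v)) ++ cross (PySem.List.dedup li) with hC
  have hCnd : C.Nodup := by
    rw [hC, List.nodup_append]
    refine ⟨List.Nodup.map (fun x y h => by simpa using h) hdnd,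
      cross_nodup _ (PySem.List.nodup_dedup li), fun p hp q hq => ?_⟩
    obtain ⟨v, _, rfl⟩ := List.mem_map.1 hp
    obtain ⟨a, b, _, _, hne, rfl⟩ := (cross_mem _ (PySem.List.nodup_dedup li) q).1 hq
    intro h
    have := sortp_inj ((sortp_self v).trans h)
    omega
  have hCm : ∀ p, p ∈ C ↔ Mset li p := by
    intro p
    rw [hC, List.mem_append, List.mem_map, cross_mem _ (PySem.List.nodup_dedup li) p]
    unfold Mset
    constructor
    · rintro (⟨v, hv, rfl⟩ | ⟨a, b, ha, hb, hne, rfl⟩)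
      · exact Or.inr ⟨v, (hdm v).1 hv, (sortp_self v) ▸ rfl⟩
      · exact Or.inl ⟨a, b, (PySem.List.mem_dedup li a).1 ha, (PySem.List.mem_dedup li b).1 hb,
          hne, rfl⟩
    · rintro (⟨a, b, ha, hb, hne, rfl⟩ | ⟨v, hc, rfl⟩)
      · exact Or.inr ⟨a, b, (PySem.List.mem_dedup li a).2 ha, (PySem.List.mem_dedup li b).2 hb,
          hne, rfl⟩
      · exact Or.inl ⟨v, (hdm v).2 hc, rfl⟩
  have hperm : (((tri li).foldl stepT ([], 0)).1).Perm C :=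
    (List.perm_ext_iff_of_nodup h1 hCnd).mpr (fun p => by
      rw [h3 p]
      simp only [List.not_mem_nil, false_or]
      rw [memBoxChar li p, ← hCm p])
  rw [hperm.countP_eq]
  rw [List.countP_append, List.countP_map]
  have hdiag : (pgood ∘ fun v => (v, v)) = fun _ => true := by
    funext v
    simpa [pgood] using good_self v
  rw [hdiag, List.countP_true]
  push_cast
  ring

-- ===== VERDICT (by name: the statement is the Claim_ definition above) =====
theorem Solve_spec : Claim_equal_Solve := by
  intro li _
  unfold Spec_Solve
  exact Solve_spec' li
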